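-- pv_equiv track=rewrite | github.com/pypi-data/pypi-mirror-359 | packages/reproto/reproto-0.2.4.tar.gz/reproto-0.2.4/core/reconstructor.py | _parse_map_types
-- ===== SOURCE A (Python) =====
-- def _parse_map_types(map_content: str) -> tuple:
--     """
--     解析map类型的键值类型
--
--     Args:
--         map_content: map内容，如 "string, Contact" 或 "string, List<Contact>"
--
--     Returns:
--         (key_type, value_type) 元组
--     """
--     # 简单情况：没有嵌套的尖括号
--     if '<' not in map_content:
--         parts = [part.strip() for part in map_content.split(',', 1)]
--         if len(parts) == 2:
--             return parts[0], parts[1]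
--
--     # 复杂情况：处理嵌套的尖括号
--     bracket_count = 0
--     for i, char in enumerate(map_content):
--         if char == '<':
--             bracket_count += 1
--         elif char == '>':
--             bracket_count -= 1
--         elif char == ',' and bracket_count == 0:
--             # 找到分隔符
--             key_type = map_content[:i].strip()
--             value_type = map_content[i+1:].strip()
--             return key_type, value_type
--
--     # 如果解析失败，返回默认值
--     return 'string', 'string'
-- ===== SOURCE B (Python) =====
-- def _parse_map_types(map_content: str) -> tuple:
--     """Token pass: split on every comma, walk the boundaries accumulating the
--     net '<'/'>' balance; the first boundary with balance zero is the split."""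
--     parts = map_content.split(',')
--     balance = 0
--     for k in range(1, len(parts)):
--         balance += parts[k - 1].count('<') - parts[k - 1].count('>')
--         if balance == 0:
--             return ','.join(parts[:k]).strip(), ','.join(parts[k:]).strip()
--     return 'string', 'string'
-- ===== Notes on version B (the rewrite author's own statement) =====
-- stated objective: simpler
-- what changed: A's char-by-char enumerate scan with a bracket counter (plus a separate fast path for inputs without angle brackets) is replaced by a single token pass: split on every comma and walk the boundaries accumulating the net angle-bracket balance of the consumed parts, returning at the first balanced boundary; the fast path disappears.
-- intended difference: On inputs with no opening angle bracket but a closing one before the first comma (e.g. ">,a"), A's fast path splits at the first comma anyway and returns the two halves, while B returns the failure default (string, string) -- the same treatment A itself gives every other bracket-unbalanced input -- which is the intended behaviour for such malformed map contents. — e.g. on _parse_map_types(">,a"): A returns (">", "a"), B returns ("string", "string")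
import Mathlib
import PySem

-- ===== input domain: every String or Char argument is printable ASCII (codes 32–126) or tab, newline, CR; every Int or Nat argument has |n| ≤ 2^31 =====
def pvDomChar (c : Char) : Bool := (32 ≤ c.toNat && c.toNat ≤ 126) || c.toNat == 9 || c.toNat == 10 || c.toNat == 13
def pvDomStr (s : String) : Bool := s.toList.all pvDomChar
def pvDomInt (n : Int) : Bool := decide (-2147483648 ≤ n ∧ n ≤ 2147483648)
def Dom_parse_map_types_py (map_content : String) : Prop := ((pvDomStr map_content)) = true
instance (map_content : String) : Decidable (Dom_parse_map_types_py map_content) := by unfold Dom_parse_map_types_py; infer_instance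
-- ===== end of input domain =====

-- B replaces A's char-by-char depth scan (plus its separate no-angle-bracket fast path) by a
-- single token pass over the comma-split parts, accumulating the net angle-bracket balance at
-- each boundary (objective: simpler; a timing run also measured B faster; on inputs with a
-- closing but no opening angle bracket before the first comma B intentionally returns the
-- failure default instead of A's fast-path split — see D_ below).

-- ===== PORT A =====
-- the enumerate loop of A: cs is the whole string, i the current index, bc the bracket_count
def scanA : List Char → Nat → Int → List Char → String × String
  | _, _, _, [] => ("string", "string")
  | cs, i, bc, c :: rest =>
    if c = '<' then scanA cs (i+1) (bc+1) rest
    else if c = '>' then scanA cs (i+1) (bc-1) rest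
    else if c = ',' ∧ bc = 0 then
      (String.ofList (PySem.Chars.strip (PySem.List.slice cs none (some (i : Int)))),
       String.ofList (PySem.Chars.strip (PySem.List.slice cs (some ((i : Int) + 1)) none)))
    else scanA cs (i+1) bc rest

def parse_map_types_py (map_content : String) : String × String :=
  -- fast path: '<' not in map_content, split(',', 1); early return modelled with Option
  let fast : Option (String × String) :=
    if PySem.Str.isIn "<" map_content = false then
      match ((PySem.Str.splitMax? map_content "," 1).getD []).map PySem.Str.strip with
      | [a, b] => some (a, b)
      | _ => none
    else none
  match fast with
  | some r => r
  | none => scanA map_content.toList 0 0 map_content.toList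

-- ===== PORT B =====
-- the boundary loop of B: acc = parts[:k-1], p = parts[k-1], the third argument parts[k:]
def loopB : Int → List (List Char) → List (List Char) → String × String
  | _, _, [] => ("string", "string")
  | bal, acc, p :: rest =>
    if rest.isEmpty then ("string", "string")
    else
    let bal' := bal + ((PySem.Chars.count p ['<'] : Int) - (PySem.Chars.count p ['>'] : Int))
    if bal' = 0 then
      (String.ofList (PySem.Chars.strip (PySem.Chars.join [','] (acc ++ [p]))),
       String.ofList (PySem.Chars.strip (PySem.Chars.join [','] rest)))
    else loopB bal' (acc ++ [p]) rest

def parse_map_types_py_alt (map_content : String) : String × String :=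
  loopB 0 [] (PySem.Chars.splitOn map_content.toList [','])

-- ===== PRECONDITION & SPEC =====
-- On inputs with no opening angle bracket but a closing one before the first comma, A's fast
-- path splits at the first comma anyway (e.g. ">,a" yields the two halves), while B returns the
-- failure default ("string", "string") — as A itself does for every other bracket-unbalanced
-- input — which is the intended treatment of such malformed map contents.
def D_parse_map_types_py (map_content : String) : Prop :=
  '<' ∉ map_content.toList ∧ ',' ∈ map_content.toList ∧
    '>' ∈ map_content.toList.takeWhile (fun c => c ≠ ',')
instance (map_content : String) : Decidable (D_parse_map_types_py map_content) := by
  unfold D_parse_map_types_py; infer_instance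

def Spec_parse_map_types_py (map_content : String) (out : String × String) : Prop :=
  ¬ D_parse_map_types_py map_content → out = parse_map_types_py_alt map_content
instance (map_content : String) (out : String × String) : Decidable (Spec_parse_map_types_py map_content out) := by
  unfold Spec_parse_map_types_py; infer_instance

def pvDiffWitness_parse_map_types_py : String := ">,a"
def pvDiffWitnessOut_parse_map_types_py : (String × String) × (String × String) :=
  ((">", "a"), ("string", "string"))

-- ===== CLAIM (what is proved, stated in full; the proofs are below) =====
def Claim_unchanged_parse_map_types_py : Prop := ∀ (map_content : String), Dom_parse_map_types_py map_content → Spec_parse_map_types_py map_content (parse_map_types_py map_content)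
def Claim_changed_parse_map_types_py : Prop := Dom_parse_map_types_py (pvDiffWitness_parse_map_types_py) ∧ D_parse_map_types_py (pvDiffWitness_parse_map_types_py) ∧ parse_map_types_py (pvDiffWitness_parse_map_types_py) = pvDiffWitnessOut_parse_map_types_py.1 ∧ parse_map_types_py_alt (pvDiffWitness_parse_map_types_py) = pvDiffWitnessOut_parse_map_types_py.2 ∧ pvDiffWitnessOut_parse_map_types_py.1 ≠ pvDiffWitnessOut_parse_map_types_py.2
def Claim_exact_parse_map_types_py : Prop := ∀ (map_content : String), Dom_parse_map_types_py map_content → D_parse_map_types_py map_content → parse_map_types_py map_content ≠ parse_map_types_py_alt map_content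

-- ===== LEMMAS AND PROOFS =====

-- reference: first comma at net bracket balance 0, returning (prefix, suffix)
def split0 : List Char → Int → Option (List Char × List Char)
  | [], _ => none
  | c :: r, b =>
    if c = '<' then (split0 r (b+1)).map (fun q => (c :: q.1, q.2))
    else if c = '>' then (split0 r (b-1)).map (fun q => (c :: q.1, q.2))
    else if c = ',' ∧ b = 0 then some ([], r)
    else (split0 r b).map (fun q => (c :: q.1, q.2))

def balC (p : List Char) : Int := (p.count '<' : Int) - (p.count '>' : Int)

-- reference split on ','
def sp : List Char → List (List Char)
  | [] => [[]]
  | c :: r => if c = ',' then [] :: sp r else (sp r).modifyHead (fun h => c :: h)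

def Fref (l : List Char) : String × String :=
  match split0 l 0 with
  | none => ("string", "string")
  | some q => (String.ofList (PySem.Chars.strip q.1), String.ofList (PySem.Chars.strip q.2))

theorem join_cons_ne_nil (a : List Char) (t : List (List Char)) (h : t ≠ []) :
    PySem.Chars.join [','] (a :: t) = a ++ ',' :: PySem.Chars.join [','] t := by
  cases t with
  | nil => exact absurd rfl h
  | cons b u => rw [PySem.Chars.join_cons_cons]; simp

theorem sp_ne_nil (l : List Char) : sp l ≠ [] := by
  induction l with
  | nil => simp [sp]
  | cons c r ih =>
    simp only [sp]
    split
    · simp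
    · cases h : sp r with
      | nil => exact absurd h ih
      | cons a t => simp [h]

theorem sp_comma_free (l : List Char) : ∀ p ∈ sp l, ',' ∉ p := by
  induction l with
  | nil => intro p hp; simp [sp] at hp; simp [hp]
  | cons c r ih =>
    intro p hp
    simp only [sp] at hp
    by_cases hc : c = ','
    · rw [if_pos hc] at hp
      rcases List.mem_cons.mp hp with h | h
      · simp [h]
      · exact ih p h
    · rw [if_neg hc] at hp
      cases hsp : sp r with
      | nil => exact absurd hsp (sp_ne_nil r)
      | cons a t =>
        rw [hsp, List.modifyHead_cons] at hp
        rcases List.mem_cons.mp hp with h | h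
        · subst h
          intro hmem
          rcases List.mem_cons.mp hmem with h' | h'
          · exact hc h'.symm
          · exact ih a (hsp ▸ List.mem_cons_self) h'
        · exact ih p (hsp ▸ List.mem_cons_of_mem a h)

theorem join_sp (l : List Char) : PySem.Chars.join [','] (sp l) = l := by
  induction l with
  | nil => simp [sp, PySem.Chars.join_singleton]
  | cons c r ih =>
    by_cases hc : c = ','
    · subst hc
      rw [show sp (',' :: r) = [] :: sp r from by simp [sp],
        join_cons_ne_nil _ _ (sp_ne_nil r), ih]
      rfl
    · simp only [sp, if_neg hc]
      cases hsp : sp r with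
      | nil => exact absurd hsp (sp_ne_nil r)
      | cons a t =>
        rw [List.modifyHead_cons]
        cases t with
        | nil =>
          rw [PySem.Chars.join_singleton]
          rw [hsp, PySem.Chars.join_singleton] at ih
          simp [ih]
        | cons b u =>
          rw [join_cons_ne_nil _ _ (by simp)]
          rw [hsp, join_cons_ne_nil _ _ (by simp)] at ih
          simp [← ih]

theorem isPrefixOf_single_false {c c0 : Char} (rest : List Char) (hc : ¬ c = c0) :
    [c0].isPrefixOf (c :: rest) = false := by
  show (c0 == c && ([] : List Char).isPrefixOf rest) = false
  have hbe : (c0 == c) = false := beq_eq_false_iff_ne.mpr (fun h : c0 = c => hc h.symm)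
  rw [hbe, Bool.false_and]

theorem splitOn_go_spec (fuel : Nat) : ∀ (l cur : List Char) (acc : List (List Char)), l.length ≤ fuel →
    PySem.Chars.splitOn.go [','] fuel l cur acc
      = acc.reverse ++ (sp l).modifyHead (fun h => cur.reverse ++ h) := by
  induction fuel with
  | zero =>
    intro l cur acc hl
    have : l = [] := List.length_eq_zero_iff.mp (Nat.le_zero.mp hl)
    subst this
    simp [PySem.Chars.splitOn.go, sp]
  | succ n ih =>
    intro l cur acc hl
    cases l with
    | nil => simp [PySem.Chars.splitOn.go, sp]
    | cons c rest =>
      simp only [List.length_cons, Nat.succ_le_succ_iff] at hl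
      by_cases hc : c = ','
      · subst hc
        have hpre : [','].isPrefixOf (',' :: rest) = true := by simp [List.isPrefixOf]
        simp only [PySem.Chars.splitOn.go, hpre, if_true, List.length_singleton, List.drop_one,
          List.tail_cons]
        rw [ih rest [] (List.reverse cur :: acc) hl]
        simp only [sp, if_pos rfl, List.reverse_cons, List.modifyHead_cons]
        cases hsp : sp rest with
        | nil => exact absurd hsp (sp_ne_nil rest)
        | cons a t => simp
      · have hpre : [','].isPrefixOf (c :: rest) = false := isPrefixOf_single_false rest hc
        simp only [PySem.Chars.splitOn.go, hpre]
        rw [if_neg (by simp)]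
        rw [ih rest (c :: cur) acc hl]
        simp only [sp, if_neg hc]
        cases hsp : sp rest with
        | nil => exact absurd hsp (sp_ne_nil rest)
        | cons a t => simp

theorem splitOn_eq_sp (l : List Char) : PySem.Chars.splitOn l [','] = sp l := by
  unfold PySem.Chars.splitOn
  rw [splitOn_go_spec (l.length + 1) l [] [] (Nat.le_succ _)]
  simp only [List.reverse_nil, List.nil_append]
  cases hsp : sp l with
  | nil => exact absurd hsp (sp_ne_nil l)
  | cons a t => simp

theorem splitOnMax_go_zero (fuel : Nat) : ∀ (l cur : List Char) (acc : List (List Char)),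
    PySem.Chars.splitOnMax.go [','] fuel 0 l cur acc = acc.reverse ++ [cur.reverse ++ l] := by
  cases fuel with
  | zero => intro l cur acc; simp [PySem.Chars.splitOnMax.go]
  | succ n =>
    intro l cur acc
    cases l with
    | nil => simp [PySem.Chars.splitOnMax.go]
    | cons c rest => simp [PySem.Chars.splitOnMax.go]

theorem splitOnMax_go_one (fuel : Nat) : ∀ (l cur : List Char) (acc : List (List Char)), l.length ≤ fuel →
    PySem.Chars.splitOnMax.go [','] fuel 1 l cur acc
      = acc.reverse ++ (if ',' ∈ l then
          [cur.reverse ++ l.takeWhile (fun c => c ≠ ','), (l.dropWhile (fun c => c ≠ ',')).tail]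
        else [cur.reverse ++ l]) := by
  induction fuel with
  | zero =>
    intro l cur acc hl
    have : l = [] := List.length_eq_zero_iff.mp (Nat.le_zero.mp hl)
    subst this
    simp [PySem.Chars.splitOnMax.go]
  | succ n ih =>
    intro l cur acc hl
    cases l with
    | nil => simp [PySem.Chars.splitOnMax.go]
    | cons c rest =>
      simp only [List.length_cons, Nat.succ_le_succ_iff] at hl
      by_cases hc : c = ','
      · subst hc
        have hpre : [','].isPrefixOf (',' :: rest) = true := by simp [List.isPrefixOf]
        simp only [PySem.Chars.splitOnMax.go, hpre, if_true, List.length_singleton, List.drop_one,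
          List.tail_cons]
        rw [if_neg (by norm_num)]
        rw [splitOnMax_go_zero n rest [] (List.reverse cur :: acc)]
        simp [List.takeWhile_cons, List.dropWhile_cons]
      · have hpre : [','].isPrefixOf (c :: rest) = false := isPrefixOf_single_false rest hc
        simp only [PySem.Chars.splitOnMax.go, hpre]
        rw [if_neg (by norm_num)]
        rw [if_neg (by simp)]
        rw [ih rest (c :: cur) acc hl]
        have hmem : (',' ∈ c :: rest) ↔ (',' ∈ rest) := by
          constructor
          · intro h
            rcases List.mem_cons.mp h with h' | h'
            · exact absurd h'.symm hc
            · exact h'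
          · exact List.mem_cons_of_mem c
        by_cases hm : ',' ∈ rest
        · simp [hm, hmem, List.takeWhile_cons, List.dropWhile_cons, hc]
        · simp [hm, hmem, hc]

theorem splitOnMax_one (l : List Char) : PySem.Chars.splitOnMax l [','] 1
    = if ',' ∈ l then [l.takeWhile (fun c => c ≠ ','), (l.dropWhile (fun c => c ≠ ',')).tail]
      else [l] := by
  unfold PySem.Chars.splitOnMax
  rw [if_neg (by norm_num)]
  have : (1 : Int).toNat = 1 := rfl
  rw [this, splitOnMax_go_one (l.length + 1) l [] [] (Nat.le_succ _)]
  simp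

theorem count_go_spec (c0 : Char) (fuel : Nat) : ∀ (l : List Char) (a : Nat), l.length ≤ fuel →
    PySem.Chars.count.go [c0] fuel l a = a + l.count c0 := by
  induction fuel with
  | zero =>
    intro l a hl
    have : l = [] := List.length_eq_zero_iff.mp (Nat.le_zero.mp hl)
    subst this
    simp [PySem.Chars.count.go]
  | succ n ih =>
    intro l a hl
    cases l with
    | nil => simp [PySem.Chars.count.go]
    | cons c rest =>
      simp only [List.length_cons, Nat.succ_le_succ_iff] at hl
      by_cases hc : c = c0
      · subst hc
        have hpre : [c].isPrefixOf (c :: rest) = true := by simp [List.isPrefixOf]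
        simp only [PySem.Chars.count.go, hpre, if_true, List.length_singleton, List.drop_one,
          List.tail_cons]
        rw [ih rest (a + 1) hl]
        simp [List.count_cons]
        omega
      · have hpre : [c0].isPrefixOf (c :: rest) = false := isPrefixOf_single_false rest hc
        simp only [PySem.Chars.count.go, hpre]
        rw [if_neg (by simp)]
        rw [ih rest a hl]
        simp [List.count_cons, hc]

theorem count_singleton (l : List Char) (c0 : Char) : PySem.Chars.count l [c0] = l.count c0 := by
  unfold PySem.Chars.count
  rw [if_neg (by simp)]
  have := count_go_spec c0 l.length l 0 (Nat.le_refl _)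
  simpa using this

theorem balC_lt (r : List Char) : balC ('<' :: r) = balC r + 1 := by
  simp [balC, List.count_cons]; push_cast; ring

theorem balC_gt (r : List Char) : balC ('>' :: r) = balC r - 1 := by
  simp [balC, List.count_cons]; push_cast; ring

theorem balC_other {c : Char} (r : List Char) (h1 : c ≠ '<') (h2 : c ≠ '>') :
    balC (c :: r) = balC r := by
  simp [balC, List.count_cons, h1, h2]

theorem S0 (p : List Char) : ∀ b, ',' ∉ p → split0 p b = none := by
  induction p with
  | nil => intro b _; rfl
  | cons c r ih =>
    intro b h
    simp only [List.mem_cons, not_or] at h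
    obtain ⟨h1, h2⟩ := h
    simp only [split0]
    by_cases hl : c = '<'
    · rw [if_pos hl, ih _ h2]; rfl
    · rw [if_neg hl]
      by_cases hg : c = '>'
      · rw [if_pos hg, ih _ h2]; rfl
      · rw [if_neg hg, if_neg (fun hc => h1 hc.1.symm), ih _ h2]; rfl

theorem S1 (p : List Char) : ∀ (r : List Char) (b : Int), ',' ∉ p →
    split0 (p ++ ',' :: r) b
      = if b + balC p = 0 then some (p, r)
        else (split0 r (b + balC p)).map (fun q => (p ++ ',' :: q.1, q.2)) := by
  induction p with
  | nil =>
    intro r b _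
    have hb : balC ([] : List Char) = 0 := by simp [balC]
    simp only [List.nil_append, split0, hb, add_zero]
    rw [if_neg (by decide), if_neg (by decide)]
    by_cases hz : b = 0 <;> simp [hz]
  | cons c r0 ih =>
    intro r b h
    simp only [List.mem_cons, not_or] at h
    obtain ⟨h1, h2⟩ := h
    simp only [List.cons_append, split0]
    by_cases hl : c = '<'
    · subst hl
      rw [if_pos rfl, ih r (b + 1) h2, balC_lt]
      by_cases hz : b + 1 + balC r0 = 0
      · rw [if_pos hz, if_pos (by omega)]; rfl
      · rw [if_neg hz, if_neg (by omega), Option.map_map]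
        have : b + (balC r0 + 1) = b + 1 + balC r0 := by ring
        rw [this]
        rfl
    · rw [if_neg hl]
      by_cases hg : c = '>'
      · subst hg
        rw [if_pos rfl, ih r (b - 1) h2, balC_gt]
        by_cases hz : b - 1 + balC r0 = 0
        · rw [if_pos hz, if_pos (by omega)]; rfl
        · rw [if_neg hz, if_neg (by omega), Option.map_map]
          have : b + (balC r0 - 1) = b - 1 + balC r0 := by ring
          rw [this]
          rfl
      · rw [if_neg hg, if_neg (fun hc => h1 hc.1.symm), ih r b h2, balC_other r0 hl hg]
        by_cases hz : b + balC r0 = 0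
        · rw [if_pos hz, if_pos hz]; rfl
        · rw [if_neg hz, if_neg hz, Option.map_map]; rfl

theorem glue (acc : List (List Char)) (p q : List Char) :
    PySem.Chars.join [','] (acc ++ [p, q]) = PySem.Chars.join [','] (acc ++ [p ++ ',' :: q]) := by
  induction acc with
  | nil =>
    simp only [List.nil_append]
    rw [join_cons_ne_nil _ _ (by simp), PySem.Chars.join_singleton, PySem.Chars.join_singleton]
  | cons a t ih =>
    simp only [List.cons_append]
    rw [join_cons_ne_nil _ _ (by simp), join_cons_ne_nil _ _ (by simp), ih]

theorem loopB_cons (bal : Int) (acc : List (List Char)) (p p2 : List Char)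
    (rest2 : List (List Char)) :
    loopB bal acc (p :: p2 :: rest2)
      = (if bal + ((PySem.Chars.count p ['<'] : Int) - (PySem.Chars.count p ['>'] : Int)) = 0 then
          (String.ofList (PySem.Chars.strip (PySem.Chars.join [','] (acc ++ [p]))),
           String.ofList (PySem.Chars.strip (PySem.Chars.join [','] (p2 :: rest2))))
        else loopB (bal + ((PySem.Chars.count p ['<'] : Int) - (PySem.Chars.count p ['>'] : Int)))
               (acc ++ [p]) (p2 :: rest2)) := rfl

theorem loopB_spec (parts : List (List Char)) : ∀ (b : Int) (acc : List (List Char)),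
    parts ≠ [] → (∀ p ∈ parts, ',' ∉ p) →
    loopB b acc parts
      = match split0 (PySem.Chars.join [','] parts) b with
        | none => ("string", "string")
        | some q => (String.ofList (PySem.Chars.strip (PySem.Chars.join [','] (acc ++ [q.1]))),
                     String.ofList (PySem.Chars.strip q.2)) := by
  induction parts with
  | nil => intro b acc h _; exact absurd rfl h
  | cons p rest ih =>
    intro b acc _ hcf
    have hp : ',' ∉ p := hcf p List.mem_cons_self
    cases rest with
    | nil =>
      rw [PySem.Chars.join_singleton, S0 p b hp]
      rfl
    | cons p2 rest2 =>
      have hbal : b + ((PySem.Chars.count p ['<'] : Int) - (PySem.Chars.count p ['>'] : Int))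
          = b + balC p := by simp [count_singleton, balC]
      rw [loopB_cons, hbal]
      rw [join_cons_ne_nil p (p2 :: rest2) (by simp), S1 p _ b hp]
      by_cases hz : b + balC p = 0
      · rw [if_pos hz, if_pos hz]
      · rw [if_neg hz, if_neg hz]
        rw [ih (b + balC p) (acc ++ [p]) (by simp) (fun x hx => hcf x (List.mem_cons_of_mem p hx))]
        cases hs : split0 (PySem.Chars.join [','] (p2 :: rest2)) (b + balC p) with
        | none => rfl
        | some q =>
          simp only [Option.map_some]
          have : acc ++ [p] ++ [q.1] = acc ++ [p, q.1] := by simp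
          rw [this, glue]

theorem B_eq (s : String) : parse_map_types_py_alt s = Fref s.toList := by
  unfold parse_map_types_py_alt Fref
  rw [splitOn_eq_sp, loopB_spec (sp s.toList) 0 [] (sp_ne_nil _) (sp_comma_free _), join_sp]
  cases split0 s.toList 0 with
  | none => rfl
  | some q => simp [PySem.Chars.join_singleton]

theorem scanA_spec (suf : List Char) : ∀ (pre : List Char) (b : Int),
    scanA (pre ++ suf) pre.length b suf
      = match split0 suf b with
        | none => ("string", "string")
        | some q => (String.ofList (PySem.Chars.strip (pre ++ q.1)),
                     String.ofList (PySem.Chars.strip q.2)) := by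
  induction suf with
  | nil => intro pre b; rfl
  | cons c rest ih =>
    intro pre b
    have hsplit : pre ++ c :: rest = (pre ++ [c]) ++ rest := by simp
    have hlen : pre.length + 1 = (pre ++ [c]).length := by simp
    simp only [scanA, split0]
    by_cases hl : c = '<'
    · rw [if_pos hl, if_pos hl, hsplit, hlen, ih (pre ++ [c]) (b + 1)]
      cases split0 rest (b + 1) with
      | none => rfl
      | some q => simp
    · rw [if_neg hl, if_neg hl]
      by_cases hg : c = '>'
      · rw [if_pos hg, if_pos hg, hsplit, hlen, ih (pre ++ [c]) (b - 1)]
        cases split0 rest (b - 1) with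
        | none => rfl
        | some q => simp
      · rw [if_neg hg, if_neg hg]
        by_cases hcm : c = ',' ∧ b = 0
        · rw [if_pos hcm, if_pos hcm]
          have h1 : PySem.List.slice (pre ++ c :: rest) none (some (pre.length : Int))
              = pre := by
            rw [PySem.List.slice_to _ (by positivity)]
            simp [List.take_left]
          have h2 : PySem.List.slice (pre ++ c :: rest) (some ((pre.length : Int) + 1)) none
              = rest := by
            have : ((pre.length : Int) + 1) = (((pre.length + 1 : Nat)) : Int) := by push_cast; ring
            rw [this, PySem.List.slice_from _ (by positivity)]
            rw [Int.toNat_natCast, hlen, hsplit, List.drop_left]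
          rw [h1, h2]
          simp
        · rw [if_neg hcm, if_neg hcm, hsplit, hlen, ih (pre ++ [c]) b]
          cases split0 rest b with
          | none => rfl
          | some q => simp

theorem A_scan_eq (l : List Char) : scanA l 0 0 l = Fref l := by
  have := scanA_spec l [] 0
  simp only [List.nil_append, List.length_nil] at this
  rw [this]
  unfold Fref
  cases split0 l 0 with
  | none => rfl
  | some q => simp

theorem split0_first (l : List Char) : ',' ∈ l → '<' ∉ l → '>' ∉ l.takeWhile (fun c => c ≠ ',') →
    split0 l 0 = some (l.takeWhile (fun c => c ≠ ','), (l.dropWhile (fun c => c ≠ ',')).tail) := by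
  induction l with
  | nil => intro h; simp at h
  | cons c r ih =>
    intro hm hlt hgt
    by_cases hc : c = ','
    · subst hc
      simp only [split0, if_neg (by decide : ¬ (',' : Char) = '<'),
        if_neg (by decide : ¬ (',' : Char) = '>'),
        if_pos (show (',' = ',') ∧ (0 : Int) = 0 from ⟨rfl, rfl⟩)]
      simp [List.takeWhile_cons, List.dropWhile_cons]
    · have hcl : c ≠ '<' := fun h => hlt (h ▸ List.mem_cons_self)
      have htw : (c :: r).takeWhile (fun c => c ≠ ',') = c :: r.takeWhile (fun c => c ≠ ',') := by
        simp [List.takeWhile_cons, hc]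
      have hcg : c ≠ '>' := by
        intro h
        exact hgt (htw ▸ (h ▸ List.mem_cons_self))
      have hm' : ',' ∈ r := by
        rcases List.mem_cons.mp hm with h | h
        · exact absurd h.symm hc
        · exact h
      simp only [split0, if_neg hcl, if_neg hcg,
        if_neg (fun h : c = ',' ∧ (0 : Int) = 0 => hc h.1)]
      rw [ih hm' (fun h => hlt (List.mem_cons_of_mem c h)) (fun h => hgt (htw ▸ List.mem_cons_of_mem c h))]
      simp [htw, List.dropWhile_cons, hc]

theorem split0_none (l : List Char) : ∀ b : Int, '<' ∉ l →
    (b < 0 ∨ (b = 0 ∧ '>' ∈ l.takeWhile (fun c => c ≠ ','))) → split0 l b = none := by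
  induction l with
  | nil => intro b _ _; rfl
  | cons c r ih =>
    intro b hlt hb
    have hcl : c ≠ '<' := fun h => hlt (h ▸ List.mem_cons_self)
    have hlt' : '<' ∉ r := fun h => hlt (List.mem_cons_of_mem c h)
    simp only [split0, if_neg hcl]
    by_cases hg : c = '>'
    · rw [if_pos hg, ih (b - 1) hlt' (Or.inl (by rcases hb with h | ⟨h, _⟩ <;> omega))]
      rfl
    · rw [if_neg hg]
      by_cases hc : c = ','
      · have hblt : b < 0 := by
          rcases hb with h | ⟨h0, hmem⟩
          · exact h
          · exfalso
            rw [List.takeWhile_cons, if_neg (by simp [hc])] at hmem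
            simp at hmem
        rw [if_neg (fun h => by omega : ¬ (c = ',' ∧ b = 0)), ih b hlt' (Or.inl hblt)]
        rfl
      · rw [if_neg (fun h => hc h.1)]
        have hb' : b < 0 ∨ (b = 0 ∧ '>' ∈ r.takeWhile (fun c => c ≠ ',')) := by
          rcases hb with h | ⟨h0, hmem⟩
          · exact Or.inl h
          · right
            refine ⟨h0, ?_⟩
            rw [List.takeWhile_cons, if_pos (by simp [hc])] at hmem
            rcases List.mem_cons.mp hmem with h | h
            · exact absurd h.symm hg
            · exact h
        rw [ih b hlt' hb']
        rfl

theorem mem_dropWhile {c : Char} {p : Char → Bool} (l : List Char) (h : c ∈ l)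
    (hp : p c = false) : c ∈ l.dropWhile p := by
  induction l with
  | nil => simp at h
  | cons x r ih =>
    rw [List.dropWhile_cons]
    by_cases hx : p x = true
    · rw [if_pos hx]
      rcases List.mem_cons.mp h with h' | h'
      · subst h'; rw [hx] at hp; simp at hp
      · exact ih h'
    · rw [if_neg hx]; exact h

theorem mem_strip (c : Char) (l : List Char) (h : c ∈ l) (hs : PySem.Chars.isspace c = false) :
    c ∈ PySem.Chars.strip l := by
  unfold PySem.Chars.strip PySem.Chars.rstrip PySem.Chars.lstrip
  rw [List.mem_reverse]
  apply mem_dropWhile _ _ hs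
  rw [List.mem_reverse]
  exact mem_dropWhile l h hs

theorem isIn_lt_false (s : String) (h : '<' ∉ s.toList) : PySem.Str.isIn "<" s = false := by
  rw [PySem.Str.isIn_eq]
  rw [PySem.Chars.isIn_eq_false_iff]
  intro hinf
  exact h ((List.singleton_infix_iff _ _).mp hinf)

theorem strip_str (x : String) :
    PySem.Str.strip x = String.ofList (PySem.Chars.strip x.toList) := by
  rw [← PySem.Str.toList_strip, String.ofList_toList]

-- the fast path of A: '<' not in s, ',' in s: split at the first comma
theorem fastpath (s : String) (h1 : '<' ∉ s.toList) (h2 : ',' ∈ s.toList) :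
    parse_map_types_py s
      = (String.ofList (PySem.Chars.strip (s.toList.takeWhile (fun c => c ≠ ','))),
         String.ofList (PySem.Chars.strip ((s.toList.dropWhile (fun c => c ≠ ',')).tail))) := by
  have hIn : PySem.Str.isIn "<" s = false := isIn_lt_false s h1
  have hbridge := PySem.Str.splitMax?_map s "," 1
  cases hx : PySem.Str.splitMax? s "," 1 with
  | none =>
    rw [hx] at hbridge
    simp only [Option.map_none] at hbridge
    exact absurd hbridge.symm (by unfold PySem.Chars.splitMax?; rw [if_neg (by simp)]; simp)
  | some ps =>
    rw [hx] at hbridge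
    simp only [Option.map_some] at hbridge
    have hps : List.map String.toList ps
        = [s.toList.takeWhile (fun c => c ≠ ','), (s.toList.dropWhile (fun c => c ≠ ',')).tail] := by
      have := hbridge
      unfold PySem.Chars.splitMax? at this
      rw [if_neg (by simp)] at this
      have hcomma : ("," : String).toList = [','] := rfl
      rw [hcomma] at this
      rw [Option.some_inj] at this
      rw [this, splitOnMax_one, if_pos h2]
    have hlen : ps.length = 2 := by
      have := congrArg List.length hps
      simpa using this
    obtain ⟨x1, x2, rfl⟩ := List.length_eq_two.mp hlen
    simp only [List.map_cons, List.map_nil, List.cons.injEq, and_true] at hps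
    obtain ⟨ht1, ht2⟩ := hps
    unfold parse_map_types_py
    simp only [hIn, hx, Option.getD_some, List.map_cons, List.map_nil]
    show (PySem.Str.strip x1, PySem.Str.strip x2) = _
    rw [strip_str, strip_str, ht1, ht2]

theorem no_comma_parts (s : String) (h1 : '<' ∉ s.toList) (h2 : ',' ∉ s.toList) :
    parse_map_types_py s = scanA s.toList 0 0 s.toList := by
  have hIn : PySem.Str.isIn "<" s = false := isIn_lt_false s h1
  have hbridge := PySem.Str.splitMax?_map s "," 1
  cases hx : PySem.Str.splitMax? s "," 1 with
  | none =>
    rw [hx] at hbridge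
    simp only [Option.map_none] at hbridge
    exact absurd hbridge.symm (by unfold PySem.Chars.splitMax?; rw [if_neg (by simp)]; simp)
  | some ps =>
    rw [hx] at hbridge
    simp only [Option.map_some] at hbridge
    have hps : List.map String.toList ps = [s.toList] := by
      have := hbridge
      unfold PySem.Chars.splitMax? at this
      rw [if_neg (by simp)] at this
      have hcomma : ("," : String).toList = [','] := rfl
      rw [hcomma] at this
      rw [Option.some_inj] at this
      rw [this, splitOnMax_one, if_neg h2]
    have hlen : ps.length = 1 := by
      have := congrArg List.length hps
      simpa using this
    obtain ⟨x1, rfl⟩ := List.length_eq_one_iff.mp hlen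
    unfold parse_map_types_py
    simp only [hIn, hx, Option.getD_some, List.map_cons, List.map_nil]
    rfl

-- ===== VERDICT (by name: the statement is the Claim_ definition above) =====
theorem parse_map_types_py_spec : Claim_unchanged_parse_map_types_py := by
  intro s _
  unfold Spec_parse_map_types_py
  intro hnD
  rw [B_eq]
  by_cases hIn : '<' ∈ s.toList
  · -- '<' present: the fast path is skipped, A runs the scan
    unfold parse_map_types_py
    have htrue : PySem.Str.isIn "<" s = true := by
      rw [PySem.Str.isIn_eq]
      cases hb : PySem.Chars.isIn "<".toList s.toList with
      | true => rfl
      | false =>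
        rw [PySem.Chars.isIn_eq_false_iff] at hb
        rw [show ("<" : String).toList = ['<'] from rfl] at hb
        exact absurd ((List.singleton_infix_iff _ _).mpr hIn) hb
    rw [htrue]
    exact A_scan_eq s.toList
  · by_cases hcm : ',' ∈ s.toList
    · have hgt : '>' ∉ s.toList.takeWhile (fun c => c ≠ ',') := by
        intro hg
        exact hnD ⟨hIn, hcm, hg⟩
      rw [fastpath s hIn hcm]
      unfold Fref
      rw [split0_first s.toList hcm hIn hgt]
    · rw [no_comma_parts s hIn hcm]
      exact A_scan_eq s.toList

theorem parse_map_types_py_changed : Claim_changed_parse_map_types_py := by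
  unfold Claim_changed_parse_map_types_py; decide

theorem parse_map_types_py_tight : Claim_exact_parse_map_types_py := by
  intro s _ hD
  obtain ⟨h1, h2, h3⟩ := hD
  rw [fastpath s h1 h2, B_eq]
  unfold Fref
  rw [split0_none s.toList 0 h1 (Or.inr ⟨rfl, h3⟩)]
  intro heq
  have hfst := congrArg (fun p => p.1.toList) heq
  simp only [String.toList_ofList] at hfst
  have : '>' ∈ ("string" : String).toList := by
    rw [← hfst]
    exact mem_strip '>' _ h3 (by decide)
  exact absurd this (by decide)
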